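-- pv_equiv track=rewrite | github.com/JasmineMadonna/AI_projects | NaiveBayes/NaiveBayes.py | compute_freq
-- ===== SOURCE A (Python) =====
-- def compute_freq(X, feature, y):
-- 	freq = {}
-- 	for i in range(len(X)):
-- 		val = X[i]
-- 		if val in freq.keys():
-- 			if y[i] == 0:
-- 				freq[val][0] = freq[val][0]+1
-- 			else:
-- 				freq[val][1] = freq[val][1]+1
-- 		else:
-- 			freq[val] = [0,0]
-- 			if y[i] == 0:
-- 				freq[val][0] = freq[val][0]+1
-- 			else:
-- 				freq[val][1] = freq[val][1]+1
-- 	return freq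
-- ===== SOURCE B (Python) =====
-- def compute_freq(X, feature, y):
--     # Sort-then-scan: pair each value with its label, sort by value, then one
--     # run-length pass over the sorted pairs emits each value's finished
--     # [count0, count1] at its run boundary; finally reorder by first occurrence.
--     pairs = sorted([(X[i], y[i]) for i in range(len(X))], key=lambda p: p[0])
--     out = {}
--     cur = None
--     c0 = 0
--     c1 = 0
--     for v, b in pairs:
--         if v != cur:
--             if cur is not None:
--                 out[cur] = [c0, c1]
--             cur = v
--             c0 = 0
--             c1 = 0
--         if b == 0:
--             c0 += 1
--         else:
--             c1 += 1
--     if cur is not None: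
--         out[cur] = [c0, c1]
--     return {v: out[v] for v in dict.fromkeys(X)}
-- ===== Notes on version B (the rewrite author's own statement) =====
-- stated objective: alternative
-- what changed: Replaces A's single incremental pass over a dict of in-place-mutated [c0,c1] pair-lists by sort-then-scan: pair values with labels, sort by value, emit each value's finished counts at its run boundary in one linear sweep, then reorder by first occurrence.
import Mathlib
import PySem

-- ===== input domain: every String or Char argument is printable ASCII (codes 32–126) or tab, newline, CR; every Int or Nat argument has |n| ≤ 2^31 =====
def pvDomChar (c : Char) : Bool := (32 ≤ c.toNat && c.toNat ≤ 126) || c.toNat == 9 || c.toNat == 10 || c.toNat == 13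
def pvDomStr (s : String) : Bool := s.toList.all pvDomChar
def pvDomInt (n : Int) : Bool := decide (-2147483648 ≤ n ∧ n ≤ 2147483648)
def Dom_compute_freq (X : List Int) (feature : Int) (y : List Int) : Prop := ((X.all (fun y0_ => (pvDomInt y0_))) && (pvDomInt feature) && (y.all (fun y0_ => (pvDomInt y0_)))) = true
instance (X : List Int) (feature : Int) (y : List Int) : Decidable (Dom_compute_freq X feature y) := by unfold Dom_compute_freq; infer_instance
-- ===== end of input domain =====

-- B replaces A's single incremental dict pass by sort-then-scan (sort pairs by value, emit each
-- run's finished counts at its boundary, reorder by first occurrence) — alternative algorithm, not faster.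


-- ===== PORT A =====
def compute_freq (X : List Int) (feature : Int) (y : List Int) : List (Int × List Int) :=
  ((PySem.List.pyRange 0 (X.length : Int) 1).foldl (fun freq i =>
      let val := PySem.List.pyGetD X i 0
      if freq.contains val then
        if PySem.List.pyGetD y i 0 = 0 then
          freq.modify val [] (fun l => PySem.List.pySetD l 0 (PySem.List.pyGetD l 0 0 + 1))
        else
          freq.modify val [] (fun l => PySem.List.pySetD l 1 (PySem.List.pyGetD l 1 0 + 1))
      else
        let freq2 := freq.insert val [0, 0]
        if PySem.List.pyGetD y i 0 = 0 then
          freq2.modify val [] (fun l => PySem.List.pySetD l 0 (PySem.List.pyGetD l 0 0 + 1))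
        else
          freq2.modify val [] (fun l => PySem.List.pySetD l 1 (PySem.List.pyGetD l 1 0 + 1)))
    PySem.Dict.empty).items

-- ===== PORT B =====
-- the loop body of Source B: flush at a run boundary, then bump the pending counter
def pvStepB (s : PySem.Dict Int (List Int) × Option Int × Int × Int) (p : Int × Int) :
    PySem.Dict Int (List Int) × Option Int × Int × Int :=
  let s' := if s.2.1 ≠ some p.1 then
      ((match s.2.1 with
        | some u => s.1.insert u [s.2.2.1, s.2.2.2]
        | none => s.1), some p.1, (0 : Int), (0 : Int))
    else s
  if p.2 = 0 then (s'.1, s'.2.1, s'.2.2.1 + 1, s'.2.2.2)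
  else (s'.1, s'.2.1, s'.2.2.1, s'.2.2.2 + 1)

-- the trailing 'if cur is not None: out[cur] = [c0, c1]' of Source B
def pvFlushB (s : PySem.Dict Int (List Int) × Option Int × Int × Int) :
    PySem.Dict Int (List Int) :=
  match s.2.1 with
  | some u => s.1.insert u [s.2.2.1, s.2.2.2]
  | none => s.1

def compute_freq_alt (X : List Int) (feature : Int) (y : List Int) : List (Int × List Int) :=
  let pairs := PySem.List.sorted ((PySem.List.pyRange 0 (X.length : Int) 1).map
    (fun i => (PySem.List.pyGetD X i 0, PySem.List.pyGetD y i 0))) (fun p => p.1) false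
  let out := pvFlushB (pairs.foldl pvStepB (PySem.Dict.empty, none, 0, 0))
  (PySem.List.dedup X).map (fun v => (v, out.getD v [0, 0]))

-- ===== PRECONDITION & SPEC =====
-- Pre_ excludes exactly the inputs where Python A raises IndexError: y shorter than X
-- (A reads y[i] for every i < len(X); B raises there too).
def Pre_compute_freq (X : List Int) (feature : Int) (y : List Int) : Prop := X.length ≤ y.length
instance (X : List Int) (feature : Int) (y : List Int) : Decidable (Pre_compute_freq X feature y) := by unfold Pre_compute_freq; infer_instance
def pvWitness_compute_freq : List Int × Int × List Int := ([1, 2, 1], 0, [0, 1, 1])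

def Spec_compute_freq (X : List Int) (feature : Int) (y : List Int) (out : List (Int × List Int)) : Prop := out = compute_freq_alt X feature y
instance (X : List Int) (feature : Int) (y : List Int) (out : List (Int × List Int)) : Decidable (Spec_compute_freq X feature y out) := by unfold Spec_compute_freq; infer_instance

-- ===== CLAIM (what is proved, stated in full; the proofs are below) =====
def Claim_equal_compute_freq : Prop := ∀ (X : List Int) (feature : Int) (y : List Int), Dom_compute_freq X feature y → Pre_compute_freq X feature y → Spec_compute_freq X feature y (compute_freq X feature y)

-- ===== LEMMAS AND PROOFS =====

-- A's loop step, as a function of the pair (X[i], y[i])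
def stepA (freq : PySem.Dict Int (List Int)) (p : Int × Int) : PySem.Dict Int (List Int) :=
  if freq.contains p.1 then
    if p.2 = 0 then
      freq.modify p.1 [] (fun l => PySem.List.pySetD l 0 (PySem.List.pyGetD l 0 0 + 1))
    else
      freq.modify p.1 [] (fun l => PySem.List.pySetD l 1 (PySem.List.pyGetD l 1 0 + 1))
  else
    let freq2 := freq.insert p.1 [0, 0]
    if p.2 = 0 then
      freq2.modify p.1 [] (fun l => PySem.List.pySetD l 0 (PySem.List.pyGetD l 0 0 + 1))
    else
      freq2.modify p.1 [] (fun l => PySem.List.pySetD l 1 (PySem.List.pyGetD l 1 0 + 1))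

-- occurrence counts of value v with label 0 / label ≠ 0 in the pair list
def cnt0 (v : Int) (P : List (Int × Int)) : Int :=
  ((P.filter (fun p => p.1 == v && p.2 == 0)).length : Int)
def cnt1 (v : Int) (P : List (Int × Int)) : Int :=
  ((P.filter (fun p => p.1 == v && !(p.2 == 0))).length : Int)

theorem keys_stepA (freq : PySem.Dict Int (List Int)) (p : Int × Int) :
    (stepA freq p).keys = PySem.Set.add freq.keys p.1 := by
  by_cases hc : freq.contains p.1
  · have hmem : p.1 ∈ freq.keys := (PySem.Dict.contains_iff_mem_keys freq p.1).mp hc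
    have hk : PySem.Set.contains freq.keys p.1 = true := by
      simp [PySem.Set.contains, hmem]
    simp only [stepA, hc, if_true, PySem.Dict.modify, PySem.Set.add, hk]
    split_ifs <;> simp [PySem.Dict.keys_insert_of_contains _ _ hc]
  · have hmem : p.1 ∉ freq.keys := fun h => hc ((PySem.Dict.contains_iff_mem_keys freq p.1).mpr h)
    have hk : PySem.Set.contains freq.keys p.1 = false := by
      simp [PySem.Set.contains, hmem]
    have hcf : freq.contains p.1 = false := by simpa using hc
    have hc2 : (freq.insert p.1 ([0,0] : List Int)).contains p.1 = true :=
      PySem.Dict.contains_insert_self _ _ _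
    simp only [stepA, hc, PySem.Dict.modify, PySem.Set.add, hk]
    split_ifs <;> (try contradiction) <;>
      simp [PySem.Dict.keys_insert_of_contains _ _ hc2,
        PySem.Dict.keys_insert_of_not_contains _ _ hcf]

theorem getD_stepA (freq : PySem.Dict Int (List Int)) (p : Int × Int) (v : Int) (a b : Int)
    (h : freq.getD v [0, 0] = [a, b]) :
    (stepA freq p).getD v [0, 0] =
      if v = p.1 then (if p.2 = 0 then [a + 1, b] else [a, b + 1]) else [a, b] := by
  have hset0 : ∀ x y z : Int, PySem.List.pySetD [x, y] 0 z = [z, y] := by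
    intro x y z; simp [PySem.List.pySetD, PySem.List.pySet?, PySem.List.pyIdx?]
  have hset1 : ∀ x y z : Int, PySem.List.pySetD [x, y] 1 z = [x, z] := by
    intro x y z; simp [PySem.List.pySetD, PySem.List.pySet?, PySem.List.pyIdx?]
  have hget0 : ∀ x y : Int, PySem.List.pyGetD [x, y] 0 0 = x := by
    intro x y; simp [PySem.List.pyGetD, PySem.List.pyGet?, PySem.List.pyIdx?]
  have hget1 : ∀ x y : Int, PySem.List.pyGetD [x, y] 1 0 = y := by
    intro x y; simp [PySem.List.pyGetD, PySem.List.pyGet?, PySem.List.pyIdx?]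
  by_cases hc : freq.contains p.1
  · by_cases hv : v = p.1
    · rw [hv] at h ⊢
      obtain ⟨w, hw⟩ : ∃ w, freq.get? p.1 = some w := by
        have h2 := PySem.Dict.contains_eq_isSome_get? freq p.1
        rw [hc] at h2
        exact Option.isSome_iff_exists.mp h2.symm
      have hwab : w = [a, b] := by
        rw [PySem.Dict.getD_eq_get?_getD, hw] at h; simpa using h
      have hgetnil : freq.getD p.1 [] = [a, b] := by
        rw [PySem.Dict.getD_eq_get?_getD, hw, hwab]; rfl
      simp only [stepA, hc, if_true, PySem.Dict.modify, hgetnil]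
      split_ifs with ht <;>
        simp [hset0, hset1, hget0, hget1, PySem.Dict.getD_insert_self]
    · simp only [stepA, hc, if_true, PySem.Dict.modify, hv, if_false]
      split_ifs <;> rw [PySem.Dict.getD_insert_of_ne _ _ _ hv] <;> exact h
  · have hcf : freq.contains p.1 = false := by simpa using hc
    by_cases hv : v = p.1
    · rw [hv] at h ⊢
      have hnone : freq.get? p.1 = none := by
        have h2 := PySem.Dict.contains_eq_isSome_get? freq p.1
        rw [hcf] at h2
        exact Option.not_isSome_iff_eq_none.mp (by simp [← h2])
      have h00 : freq.getD p.1 [0, 0] = [0, 0] := by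
        rw [PySem.Dict.getD_eq_get?_getD, hnone]; rfl
      rw [h00] at h
      have ha : (0 : Int) = a := by injection h
      have hb : (0 : Int) = b := by
        have h3 : ([0] : List Int) = [b] := by injection h
        injection h3
      rw [← ha, ← hb]
      have hgetnil : (freq.insert p.1 ([0, 0] : List Int)).getD p.1 [] = [0, 0] :=
        PySem.Dict.getD_insert_self _ _ _ _
      simp only [stepA, hcf, Bool.false_eq_true, if_false, PySem.Dict.modify, hgetnil]
      split_ifs with ht <;> simp [hset0, hset1, hget0, hget1, PySem.Dict.getD_insert_self]
    · simp only [stepA, hcf, Bool.false_eq_true, if_false, PySem.Dict.modify, hv]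
      split_ifs <;> rw [PySem.Dict.getD_insert_of_ne _ _ _ hv, PySem.Dict.getD_insert_of_ne _ _ _ hv] <;> exact h

theorem keys_foldA (P : List (Int × Int)) (d : PySem.Dict Int (List Int)) :
    (P.foldl stepA d).keys = (P.map Prod.fst).foldl PySem.Set.add d.keys := by
  induction P generalizing d with
  | nil => rfl
  | cons p Q ih => simp only [List.foldl_cons, List.map_cons, ih, keys_stepA]

theorem getD_foldA (P : List (Int × Int)) (freq : PySem.Dict Int (List Int)) (v : Int) (a b : Int)
    (h : freq.getD v [0, 0] = [a, b]) :
    (P.foldl stepA freq).getD v [0, 0] = [a + cnt0 v P, b + cnt1 v P] := by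
  induction P generalizing freq a b with
  | nil => simpa [cnt0, cnt1] using h
  | cons p Q ih =>
    simp only [List.foldl_cons]
    by_cases hv : v = p.1
    · by_cases ht : p.2 = 0
      · have := ih (stepA freq p) (a + 1) b (by rw [getD_stepA freq p v a b h]; simp [hv, ht])
        rw [this]
        simp [cnt0, cnt1, hv, ht]
        ring
      · have := ih (stepA freq p) a (b + 1) (by rw [getD_stepA freq p v a b h]; simp [hv, ht])
        rw [this]
        simp [cnt0, cnt1, hv, ht]
        ring
    · have := ih (stepA freq p) a b (by rw [getD_stepA freq p v a b h]; simp [hv])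
      rw [this]
      have hne : ¬(p.1 == v && p.2 == 0) = true := by simp; intro hh; exact absurd hh.symm hv
      have hne1 : ¬(p.1 == v && !(p.2 == 0)) = true := by simp; intro hh; exact absurd hh.symm hv
      simp [cnt0, cnt1, hne, hne1]

-- pointwise cons/zero/permutation facts about the counts
theorem cnt0_cons (v : Int) (p : Int × Int) (r : List (Int × Int)) :
    cnt0 v (p :: r) = (if p.1 = v ∧ p.2 = 0 then 1 else 0) + cnt0 v r := by
  by_cases h1 : p.1 = v <;> by_cases h2 : p.2 = 0 <;>
    · simp [cnt0, h1, h2]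
      try ring

theorem cnt1_cons (v : Int) (p : Int × Int) (r : List (Int × Int)) :
    cnt1 v (p :: r) = (if p.1 = v ∧ ¬(p.2 = 0) then 1 else 0) + cnt1 v r := by
  by_cases h1 : p.1 = v <;> by_cases h2 : p.2 = 0 <;>
    · simp [cnt1, h1, h2]
      try ring

theorem cnt0_eq_zero (v : Int) (L : List (Int × Int)) (h : ∀ p ∈ L, p.1 ≠ v) :
    cnt0 v L = 0 := by
  induction L with
  | nil => rfl
  | cons p r ih =>
    rw [cnt0_cons, ih (fun q hq => h q (List.mem_cons_of_mem p hq))]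
    simp [h p List.mem_cons_self]

theorem cnt1_eq_zero (v : Int) (L : List (Int × Int)) (h : ∀ p ∈ L, p.1 ≠ v) :
    cnt1 v L = 0 := by
  induction L with
  | nil => rfl
  | cons p r ih =>
    rw [cnt1_cons, ih (fun q hq => h q (List.mem_cons_of_mem p hq))]
    simp [h p List.mem_cons_self]

theorem cnt0_perm (v : Int) (L1 L2 : List (Int × Int)) (h : L1.Perm L2) :
    cnt0 v L1 = cnt0 v L2 := by
  unfold cnt0
  rw [(h.filter _).length_eq]

theorem cnt1_perm (v : Int) (L1 L2 : List (Int × Int)) (h : L1.Perm L2) :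
    cnt1 v L1 = cnt1 v L2 := by
  unfold cnt1
  rw [(h.filter _).length_eq]

-- B's run-length sweep over a value-sorted list: the flushed dict holds the full counts
theorem fold_getD (L : List (Int × Int)) (out : PySem.Dict Int (List Int)) (u : Int)
    (c0 c1 : Int) (v : Int)
    (hs : L.Pairwise (fun p q => p.1 ≤ q.1))
    (hle : ∀ p ∈ L, u ≤ p.1) :
    (pvFlushB (L.foldl pvStepB (out, some u, c0, c1))).getD v [0, 0] =
      if v = u then [c0 + cnt0 u L, c1 + cnt1 u L]
      else if v ∈ L.map Prod.fst then [cnt0 v L, cnt1 v L]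
      else out.getD v [0, 0] := by
  induction L generalizing out u c0 c1 with
  | nil =>
    simp only [List.foldl_nil, pvFlushB, List.map_nil, List.not_mem_nil, if_false]
    by_cases hv : v = u
    · rw [if_pos hv, hv, PySem.Dict.getD_insert_self]
      simp [cnt0, cnt1]
    · rw [if_neg hv, PySem.Dict.getD_insert_of_ne _ _ _ hv]
  | cons p rest ih =>
    rw [List.pairwise_cons] at hs
    obtain ⟨hp, hrest⟩ := hs
    rw [List.foldl_cons]
    by_cases hu : u = p.1
    · -- same run: bump the pending counters
      have hle' : ∀ q ∈ rest, u ≤ q.1 := fun q hq => hu ▸ hp q hq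
      by_cases hb : p.2 = 0
      · have hstep : pvStepB (out, some u, c0, c1) p = (out, some u, c0 + 1, c1) := by
          simp [pvStepB, hu, hb]
        rw [hstep, ih out u _ _ hrest hle']
        by_cases hv : v = u
        · rw [if_pos hv, if_pos hv, cnt0_cons, cnt1_cons,
            if_pos ⟨hu.symm, hb⟩, if_neg (fun h => h.2 hb)]
          simp only [List.cons.injEq, and_true]
          constructor <;> ring
        · rw [if_neg hv, if_neg hv]
          simp only [List.map_cons, List.mem_cons]
          have hvp : ¬(v = p.1) := fun h => hv (h.trans hu.symm)
          by_cases hm : v ∈ rest.map Prod.fst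
          · rw [if_pos hm, if_pos (Or.inr hm), cnt0_cons, cnt1_cons,
              if_neg (fun h => hvp h.1.symm), if_neg (fun h => hvp h.1.symm)]
            simp
          · rw [if_neg hm, if_neg (by rintro (h | h); exact hvp h; exact hm h)]
      · have hstep : pvStepB (out, some u, c0, c1) p = (out, some u, c0, c1 + 1) := by
          simp [pvStepB, hu, hb]
        rw [hstep, ih out u _ _ hrest hle']
        by_cases hv : v = u
        · rw [if_pos hv, if_pos hv, cnt0_cons, cnt1_cons,
            if_neg (fun h => hb h.2), if_pos ⟨hu.symm, hb⟩]
          simp only [List.cons.injEq, and_true]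
          constructor <;> ring
        · rw [if_neg hv, if_neg hv]
          simp only [List.map_cons, List.mem_cons]
          have hvp : ¬(v = p.1) := fun h => hv (h.trans hu.symm)
          by_cases hm : v ∈ rest.map Prod.fst
          · rw [if_pos hm, if_pos (Or.inr hm), cnt0_cons, cnt1_cons,
              if_neg (fun h => hvp h.1.symm), if_neg (fun h => hvp h.1.symm)]
            simp
          · rw [if_neg hm, if_neg (by rintro (h | h); exact hvp h; exact hm h)]
    · -- run boundary: flush u, start the run of p.1
      have hup : u < p.1 := lt_of_le_of_ne (hle p List.mem_cons_self) hu
      have hnotu : ∀ q ∈ rest, q.1 ≠ u := fun q hq h =>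
        absurd (h ▸ hp q hq) (not_le.mpr hup)
      have hcz0 : cnt0 u (p :: rest) = 0 := by
        apply cnt0_eq_zero
        intro q hq
        rcases List.mem_cons.mp hq with h | h
        · exact h ▸ fun hh => hu hh.symm
        · exact hnotu q h
      have hcz1 : cnt1 u (p :: rest) = 0 := by
        apply cnt1_eq_zero
        intro q hq
        rcases List.mem_cons.mp hq with h | h
        · exact h ▸ fun hh => hu hh.symm
        · exact hnotu q h
      by_cases hb : p.2 = 0
      · have hstep : pvStepB (out, some u, c0, c1) p =
            (out.insert u [c0, c1], some p.1, 1, 0) := by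
          simp [pvStepB, hu, hb]
        rw [hstep, ih (out.insert u [c0, c1]) p.1 _ _ hrest hp]
        by_cases hv : v = p.1
        · have hvu : ¬ v = u := fun h => hu (h.symm.trans hv)
          rw [if_pos hv, if_neg hvu, if_pos (by rw [List.map_cons]; exact List.mem_cons.mpr (Or.inl hv)),
            hv, cnt0_cons, cnt1_cons, if_pos ⟨rfl, hb⟩, if_neg (fun h => h.2 hb)]
        · rw [if_neg hv]
          by_cases hvu : v = u
          · have hm : ¬ v ∈ rest.map Prod.fst := by
              intro h
              obtain ⟨q, hq, hq2⟩ := List.mem_map.mp h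
              exact hnotu q hq (hq2.trans hvu)
            rw [if_neg hm, if_pos hvu, hvu, PySem.Dict.getD_insert_self, hcz0, hcz1]
            simp
          · rw [if_neg hvu]
            by_cases hm : v ∈ rest.map Prod.fst
            · rw [if_pos hm, if_pos (by rw [List.map_cons]; exact List.mem_cons.mpr (Or.inr hm)),
                cnt0_cons, cnt1_cons, if_neg (fun h => hv h.1.symm),
                if_neg (fun h => hv h.1.symm)]
              simp
            · rw [if_neg hm, if_neg (by
                intro hmem
                rw [List.map_cons, List.mem_cons] at hmem
                rcases hmem with h | h
                · exact hv h
                · exact hm h), PySem.Dict.getD_insert_of_ne _ _ _ hvu]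
      · have hstep : pvStepB (out, some u, c0, c1) p =
            (out.insert u [c0, c1], some p.1, 0, 1) := by
          simp [pvStepB, hu, hb]
        rw [hstep, ih (out.insert u [c0, c1]) p.1 _ _ hrest hp]
        by_cases hv : v = p.1
        · have hvu : ¬ v = u := fun h => hu (h.symm.trans hv)
          rw [if_pos hv, if_neg hvu, if_pos (by rw [List.map_cons]; exact List.mem_cons.mpr (Or.inl hv)),
            hv, cnt0_cons, cnt1_cons, if_neg (fun h => hb h.2), if_pos ⟨rfl, hb⟩]
        · rw [if_neg hv]
          by_cases hvu : v = u
          · have hm : ¬ v ∈ rest.map Prod.fst := by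
              intro h
              obtain ⟨q, hq, hq2⟩ := List.mem_map.mp h
              exact hnotu q hq (hq2.trans hvu)
            rw [if_neg hm, if_pos hvu, hvu, PySem.Dict.getD_insert_self, hcz0, hcz1]
            simp
          · rw [if_neg hvu]
            by_cases hm : v ∈ rest.map Prod.fst
            · rw [if_pos hm, if_pos (by rw [List.map_cons]; exact List.mem_cons.mpr (Or.inr hm)),
                cnt0_cons, cnt1_cons, if_neg (fun h => hv h.1.symm),
                if_neg (fun h => hv h.1.symm)]
              simp
            · rw [if_neg hm, if_neg (by
                intro hmem
                rw [List.map_cons, List.mem_cons] at hmem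
                rcases hmem with h | h
                · exact hv h
                · exact hm h), PySem.Dict.getD_insert_of_ne _ _ _ hvu]

-- the sweep started from the empty state (cur = None)
theorem fold_getD_start (L : List (Int × Int)) (v : Int)
    (hs : L.Pairwise (fun p q => p.1 ≤ q.1)) (hv : v ∈ L.map Prod.fst) :
    (pvFlushB (L.foldl pvStepB (PySem.Dict.empty, none, 0, 0))).getD v [0, 0] =
      [cnt0 v L, cnt1 v L] := by
  match L with
  | [] => simp at hv
  | p :: rest =>
    rw [List.pairwise_cons] at hs
    obtain ⟨hp, hrest⟩ := hs
    rw [List.foldl_cons]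
    have hrw : ∀ hvp : ¬ v = p.1,
        v ∈ rest.map Prod.fst := by
      intro hvp
      rw [List.map_cons, List.mem_cons] at hv
      rcases hv with h | h
      · exact absurd h hvp
      · exact h
    by_cases hb : p.2 = 0
    · have hstep : pvStepB (PySem.Dict.empty, none, 0, 0) p =
          (PySem.Dict.empty, some p.1, 1, 0) := by
        simp [pvStepB, hb]
      rw [hstep, fold_getD rest PySem.Dict.empty p.1 _ _ v hrest hp]
      by_cases hvp : v = p.1
      · rw [if_pos hvp, hvp, cnt0_cons, cnt1_cons, if_pos ⟨rfl, hb⟩, if_neg (fun h => h.2 hb)]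
      · rw [if_neg hvp, if_pos (hrw hvp), cnt0_cons, cnt1_cons,
          if_neg (fun h => hvp h.1.symm), if_neg (fun h => hvp h.1.symm)]
        simp
    · have hstep : pvStepB (PySem.Dict.empty, none, 0, 0) p =
          (PySem.Dict.empty, some p.1, 0, 1) := by
        simp [pvStepB, hb]
      rw [hstep, fold_getD rest PySem.Dict.empty p.1 _ _ v hrest hp]
      by_cases hvp : v = p.1
      · rw [if_pos hvp, hvp, cnt0_cons, cnt1_cons, if_neg (fun h => hb h.2), if_pos ⟨rfl, hb⟩]
      · rw [if_neg hvp, if_pos (hrw hvp), cnt0_cons, cnt1_cons,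
          if_neg (fun h => hvp h.1.symm), if_neg (fun h => hvp h.1.symm)]
        simp

-- ===== VERDICT (by name: the statement is the Claim_ definition above) =====
theorem compute_freq_spec : Claim_equal_compute_freq := by
  intro X feature y _ _
  unfold Spec_compute_freq
  have hA : compute_freq X feature y =
      ((((PySem.List.pyRange 0 (X.length : Int) 1).map
          (fun i => (PySem.List.pyGetD X i 0, PySem.List.pyGetD y i 0))).foldl stepA
        PySem.Dict.empty)).items := by
    unfold compute_freq
    rw [List.foldl_map]
    rfl
  rw [hA]
  set P := (PySem.List.pyRange 0 (X.length : Int) 1).map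
    (fun i => (PySem.List.pyGetD X i 0, PySem.List.pyGetD y i 0)) with hP
  have hfst : P.map Prod.fst = X := by
    rw [hP, List.map_map]
    exact PySem.List.map_pyGetD_pyRange_zero' X 0
  have hkeys : (P.foldl stepA PySem.Dict.empty).keys = PySem.Set.ofList X := by
    rw [keys_foldA, PySem.Dict.keys_empty, hfst]
    rfl
  have hnodup : (P.foldl stepA PySem.Dict.empty).keys.Nodup := by
    rw [hkeys]
    exact PySem.Set.nodup_ofList _
  rw [PySem.Dict.items_eq_map_keys _ hnodup [0, 0], hkeys]
  unfold compute_freq_alt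
  rw [← hP, PySem.List.dedup_eq_ofList]
  apply List.map_congr_left
  intro v hvmem
  have hvX : v ∈ X := (PySem.Set.mem_ofList _ _).mp hvmem
  have hAv := getD_foldA P PySem.Dict.empty v 0 0 (by rw [PySem.Dict.getD_empty])
  rw [hAv]
  set S := PySem.List.sorted P (fun p => p.1) false with hS
  have hperm : S.Perm P := PySem.List.sorted_perm P (fun p => p.1) false
  have hsorted : S.Pairwise (fun p q => p.1 ≤ q.1) :=
    PySem.List.sorted_pairwise P (fun p => p.1)
  have hvS : v ∈ S.map Prod.fst := by
    rw [← hfst] at hvX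
    obtain ⟨q, hq, hq2⟩ := List.mem_map.mp hvX
    exact List.mem_map.mpr ⟨q, hperm.mem_iff.mpr hq, hq2⟩
  have hB := fold_getD_start S v hsorted hvS
  rw [hB, cnt0_perm v S P hperm, cnt1_perm v S P hperm]
  simp
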